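-- pv_equiv track=rewrite | github.com/Parvez49/cse-4-2 | Airtificial Intelligent/randomqueen.py | get_best_successor
-- ===== SOURCE A (Python) =====
-- def count_attacks(board):
--     """
--     Returns the number of queens that are
--     being threatened by other queens.
--     """
--     n = len(board)
--     attacks = 0
--     for i in range(n):
--         for j in range(i+1, n):
--             if board[i] == board[j] or abs(board[i]-board[j]) == j-i: #checking if two or more queens in same row or column or diagonal
--                 attacks += 1
--     return attacks
--
-- def get_best_successor(board):
--     """
--     Given a board configuration, generates all possible successor states
--     by moving each queen to a different row in its own column, and returns
--     the one with the lowest number of attacks.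
--     """
--     n = len(board)
--     successors = []
--     for col in range(n):
--         for row in range(n):
--             if board[col] != row:
--                 new_board = board.copy()
--                 new_board[col] = row
--                 successors.append(new_board)
--     best_successor = min(successors, key=count_attacks) #Return the successor with minimum conflicting
--     return best_successor
-- ===== SOURCE B (Python) =====
-- def get_best_successor(board):
--     """
--     Same result as A: the first (column-major, rows ascending) single-queen
--     move whose board has the fewest attacking pairs. Instead of materialising
--     all n*(n-1) successors and rescoring each in O(n^2), score each move by an
--     O(n) delta of the attacks involving the moved column; the shared base
--     attack count cancels in comparisons, so only relative scores are tracked.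
--     """
--     n = len(board)
--
--     def contrib(col, v):
--         # attacking pairs involving column `col` if its queen sits at row v
--         s = 0
--         for j in range(n):
--             if j != col:
--                 if v == board[j] or abs(v - board[j]) == abs(j - col):
--                     s += 1
--         return s
--
--     best = None  # (relative_score, col, row)
--     for col in range(n):
--         old = contrib(col, board[col])
--         for row in range(n):
--             if row != board[col]:
--                 d = contrib(col, row) - old
--                 if best is None or d < best[0]:
--                     best = (d, col, row)
--     d, col, row = best
--     new_board = board.copy()
--     new_board[col] = row
--     return new_board
-- ===== Notes on version B (the rewrite author's own statement) =====
-- stated objective: faster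
-- what changed: Instead of materialising every successor board and rescoring each with the O(n^2) pairwise count_attacks, B scores each single-column move by an O(n) delta of the attacks involving the moved column (the shared base count cancels in comparisons) and tracks the first minimum in the same column-major order.
-- outside the precondition, e.g. on get_best_successor([]): A raises ValueError, B raises TypeError; on get_best_successor([0]): A raises ValueError, B raises TypeError
import Mathlib
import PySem

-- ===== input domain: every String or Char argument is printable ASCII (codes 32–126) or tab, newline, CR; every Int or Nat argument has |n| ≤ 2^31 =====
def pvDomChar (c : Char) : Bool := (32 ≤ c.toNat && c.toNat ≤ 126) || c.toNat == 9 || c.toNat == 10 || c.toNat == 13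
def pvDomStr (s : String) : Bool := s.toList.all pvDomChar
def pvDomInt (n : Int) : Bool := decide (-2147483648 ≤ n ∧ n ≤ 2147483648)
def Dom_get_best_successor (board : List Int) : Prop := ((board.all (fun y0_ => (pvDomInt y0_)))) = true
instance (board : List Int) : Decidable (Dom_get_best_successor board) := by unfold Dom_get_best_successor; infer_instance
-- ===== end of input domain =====

-- B scores each single-column move by an O(n) delta of the attacks involving that column
-- (the shared base attack count cancels in comparisons) instead of A's rescoring of every
-- materialised successor: objective 'faster' (O(n^3) vs A's O(n^4)). Return value only.

-- ===== PORT A =====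
def count_attacks (board : List Int) : Int :=
  -- n = len(board) is inlined as (board.length : Int)
  (PySem.List.pyRange 0 (board.length : Int) 1).foldl (fun attacks i =>
    (PySem.List.pyRange (i+1) (board.length : Int) 1).foldl (fun attacks j =>
      if PySem.List.pyGetD board i 0 = PySem.List.pyGetD board j 0 ∨
         |PySem.List.pyGetD board i 0 - PySem.List.pyGetD board j 0| = j - i
      then attacks + 1 else attacks) attacks) 0

def get_best_successor (board : List Int) : List Int :=
  let successors : List (List Int) :=
    (PySem.List.pyRange 0 (board.length : Int) 1).foldl (fun succ col =>
      (PySem.List.pyRange 0 (board.length : Int) 1).foldl (fun succ row =>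
        if PySem.List.pyGetD board col 0 ≠ row then
          succ ++ [PySem.List.pySetD board col row]
        else succ) succ) []
  (PySem.List.min? successors count_attacks).getD []

-- ===== PORT B =====
def gbs_contrib (board : List Int) (col : Int) (v : Int) : Int :=
  (PySem.List.pyRange 0 (board.length : Int) 1).foldl (fun s j =>
    if j ≠ col then
      if v = PySem.List.pyGetD board j 0 ∨ |v - PySem.List.pyGetD board j 0| = |j - col|
      then s + 1 else s
    else s) 0

def get_best_successor_alt (board : List Int) : List Int :=
  let best : Option (Int × Int × Int) :=
    (PySem.List.pyRange 0 (board.length : Int) 1).foldl (fun best col =>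
      let old := gbs_contrib board col (PySem.List.pyGetD board col 0)
      (PySem.List.pyRange 0 (board.length : Int) 1).foldl (fun best row =>
        if row ≠ PySem.List.pyGetD board col 0 then
          let d := gbs_contrib board col row - old
          match best with
          | none => some (d, col, row)
          | some p => if d < p.1 then some (d, col, row) else some p
        else best) best) none
  match best with
  | some (_, col, row) => PySem.List.pySetD board col row
  | none => []

-- ===== PRECONDITION & SPEC =====
-- Pre_ excludes exactly the boards with no legal single-queen move ([] and [0]), on which
-- A's min(successors, key=count_attacks) raises ValueError (and B raises TypeError).
def Pre_get_best_successor (board : List Int) : Prop := board ≠ [] ∧ board ≠ [0]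
instance (board : List Int) : Decidable (Pre_get_best_successor board) := by
  unfold Pre_get_best_successor; infer_instance
def pvWitness_get_best_successor : List Int := [1, 0]

def Spec_get_best_successor (board : List Int) (out : List Int) : Prop := out = get_best_successor_alt board
instance (board : List Int) (out : List Int) : Decidable (Spec_get_best_successor board out) := by unfold Spec_get_best_successor; infer_instance

-- ===== CLAIM (what is proved, stated in full; the proofs are below) =====
def Claim_equal_get_best_successor : Prop := ∀ (board : List Int), Dom_get_best_successor board → Pre_get_best_successor board → Spec_get_best_successor board (get_best_successor board)

-- ===== LEMMAS AND PROOFS =====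
def pvW (u v d : Int) : Int := if u = v ∨ |u - v| = d then 1 else 0

def pvCA (b : List Int) : Int :=
  ∑ i ∈ Finset.range b.length, ∑ j ∈ Finset.Ico (i+1) b.length,
    pvW (b.getD i 0) (b.getD j 0) ((j : Int) - (i : Int))

def pvCB (b : List Int) (c : Nat) (v : Int) : Int :=
  ∑ j ∈ Finset.range b.length, if j = c then 0 else pvW v (b.getD j 0) |(j : Int) - (c : Int)|

def pvNC (b : List Int) (c : Nat) : Int :=
  ∑ i ∈ Finset.range b.length, ∑ j ∈ Finset.Ico (i+1) b.length,
    if i = c ∨ j = c then 0 else pvW (b.getD i 0) (b.getD j 0) ((j : Int) - (i : Int))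

theorem pv_pyRange_nat (n : Nat) :
    PySem.List.pyRange 0 (n : Int) 1 = List.map Int.ofNat (List.range n) := by
  induction n with
  | zero => simp [PySem.List.pyRange_one_eq_nil]
  | succ m ih =>
      rw [show ((m+1 : Nat) : Int) = (m : Int) + 1 by push_cast; ring,
        PySem.List.pyRange_one_succ_right (by positivity), ih, List.range_succ]
      simp

theorem pv_pyRange_shift (a n : Nat) :
    PySem.List.pyRange (a : Int) (n : Int) 1 = List.map (fun k => Int.ofNat (a + k)) (List.range (n - a)) := by
  induction n with
  | zero => simp [PySem.List.pyRange_one_eq_nil]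
  | succ m ih =>
      by_cases h : m + 1 ≤ a
      · rw [PySem.List.pyRange_one_eq_nil (by exact_mod_cast h)]
        rw [show m + 1 - a = 0 by omega]; simp
      · rw [show ((m+1 : Nat) : Int) = (m : Int) + 1 by push_cast; ring,
          PySem.List.pyRange_one_succ_right (by exact_mod_cast (by omega : a ≤ m)), ih,
          show m + 1 - a = (m - a) + 1 by omega, List.range_succ]
        simp; omega

theorem pv_foldl_sum {α : Type} (l : List α) (step : Int → α → Int) (f : α → Int)
    (h : ∀ s x, step s x = s + f x) (a : Int) :
    l.foldl step a = a + (l.map f).sum := by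
  induction l generalizing a with
  | nil => simp
  | cons x t ih => simp only [List.foldl_cons, List.map_cons, List.sum_cons, h, ih]; ring

theorem pv_sum_range (N : Nat) (f : Nat → Int) :
    ((List.range N).map f).sum = ∑ i ∈ Finset.range N, f i := by
  induction N with
  | zero => simp
  | succ n ih => simp [List.range_succ, Finset.sum_range_succ, ih]

theorem pvCB_eq (b : List Int) (c : Nat) (v : Int) :
    gbs_contrib b (c : Int) v = pvCB b c v := by
  unfold gbs_contrib pvCB
  rw [pv_pyRange_nat, List.foldl_map,
    pv_foldl_sum _ _ (fun (j:Nat) => if j = c then 0 else pvW v (b.getD j 0) |(j : Int) - (c : Int)|)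
      ?_ 0, pv_sum_range, zero_add]
  intro s j
  by_cases hj : j = c
  · simp [hj, Int.ofNat_eq_natCast]
  · have hj2 : (Int.ofNat j ≠ (c:Int)) := by simp [Int.ofNat_eq_natCast]; exact_mod_cast hj
    rw [if_pos hj2]
    simp only [if_neg hj, PySem.List.pyGetD_natCast, pvW, Int.ofNat_eq_natCast,
      List.getD_eq_getElem?_getD]
    split <;> ring

theorem pvCA_eq (b : List Int) : count_attacks b = pvCA b := by
  unfold count_attacks pvCA
  rw [pv_pyRange_nat, List.foldl_map,
    pv_foldl_sum _ _ (fun (i:Nat) => ∑ j ∈ Finset.Ico (i+1) b.length,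
      pvW (b.getD i 0) (b.getD j 0) ((j : Int) - (i : Int))) ?_ 0, pv_sum_range, zero_add]
  intro s i
  have h1 : (Int.ofNat i) + 1 = ((i+1 : Nat) : Int) := by push_cast [Int.ofNat_eq_natCast]; ring
  rw [h1, pv_pyRange_shift, List.foldl_map,
    pv_foldl_sum _ _ (fun (k:Nat) => pvW (b.getD i 0) (b.getD (i+1+k) 0) (((i+1+k : Nat) : Int) - (i : Int))) ?_ s,
    pv_sum_range]
  show s + _ = s + (∑ j ∈ Finset.Ico (i+1) b.length, pvW (b.getD i 0) (b.getD j 0) ((j : Int) - (i : Int)))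
  rw [Finset.sum_Ico_eq_sum_range]
  intro s' k
  simp only [PySem.List.pyGetD_natCast, Int.ofNat_eq_natCast, pvW, List.getD_eq_getElem?_getD]
  split <;> ring

theorem pvW_symm (u v d : Int) : pvW u v d = pvW v u d := by
  unfold pvW
  have h : (u = v ∨ |u - v| = d) ↔ (v = u ∨ |v - u| = d) := by
    rw [abs_sub_comm]
    constructor <;> rintro (h | h)
    · exact Or.inl h.symm
    · exact Or.inr h
    · exact Or.inl h.symm
    · exact Or.inr h
  simp only [h]

theorem pv_decomp (b : List Int) (c : Nat) (hc : c < b.length) :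
    pvCA b = pvNC b c + pvCB b c (b.getD c 0) := by
  classical
  set N := b.length with hN
  set g : Nat → Int := fun i => b.getD i 0 with hg
  have key : ∀ i j : Nat, pvW (g i) (g j) ((j:Int) - (i:Int))
      = (if i = c ∨ j = c then 0 else pvW (g i) (g j) ((j:Int) - (i:Int)))
        + (if i = c ∨ j = c then pvW (g i) (g j) ((j:Int) - (i:Int)) else 0) := by
    intro i j; split <;> ring
  have hsplit : pvCA b = pvNC b c
      + ∑ i ∈ Finset.range N, ∑ j ∈ Finset.Ico (i+1) N,
          (if i = c ∨ j = c then pvW (g i) (g j) ((j:Int) - (i:Int)) else 0) := by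
    unfold pvCA pvNC
    rw [← Finset.sum_add_distrib]
    refine Finset.sum_congr rfl (fun i _ => ?_)
    rw [← Finset.sum_add_distrib]
    exact Finset.sum_congr rfl (fun j _ => key i j)
  rw [hsplit]
  congr 1
  -- remaining: the c-involved part equals pvCB b c (g c)
  have hT : ∀ i ∈ Finset.range N,
      (∑ j ∈ Finset.Ico (i+1) N, (if i = c ∨ j = c then pvW (g i) (g j) ((j:Int) - (i:Int)) else 0))
      = (if i < c then pvW (g c) (g i) ((c:Int) - (i:Int))
         else if i = c then ∑ j ∈ Finset.Ico (c+1) N, pvW (g c) (g j) ((j:Int) - (c:Int)) else 0) := by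
    intro i _
    by_cases hic : i = c
    · subst hic
      rw [if_neg (lt_irrefl i), if_pos rfl]
      exact Finset.sum_congr rfl (fun j _ => by simp)
    · have h1 : ∀ j, (i = c ∨ j = c) ↔ (j = c) := by intro j; simp [hic]
      have hrhs : (if i < c then pvW (g c) (g i) ((c:Int) - (i:Int))
          else if i = c then ∑ j ∈ Finset.Ico (c+1) N, pvW (g c) (g j) ((j:Int) - (c:Int)) else 0)
          = (if i < c then pvW (g c) (g i) ((c:Int) - (i:Int)) else 0) := by
        by_cases h : i < c
        · simp [h]
        · simp [h, hic]
      rw [hrhs]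
      calc (∑ j ∈ Finset.Ico (i+1) N, (if i = c ∨ j = c then pvW (g i) (g j) ((j:Int) - (i:Int)) else 0))
          = ∑ j ∈ Finset.Ico (i+1) N, (if j = c then pvW (g i) (g j) ((j:Int) - (i:Int)) else 0) := by
            exact Finset.sum_congr rfl (fun j _ => by rw [if_congr (h1 j) rfl rfl])
        _ = if c ∈ Finset.Ico (i+1) N then pvW (g i) (g c) ((c:Int) - (i:Int)) else 0 := by
            rw [Finset.sum_ite_eq' (Finset.Ico (i+1) N) c (fun j => pvW (g i) (g j) ((j:Int) - (i:Int)))]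
        _ = if i < c then pvW (g c) (g i) ((c:Int) - (i:Int)) else 0 := by
            simp only [Finset.mem_Ico]
            rw [if_congr (show (i + 1 ≤ c ∧ c < N) ↔ i < c by omega) rfl rfl, pvW_symm]
  rw [Finset.sum_congr rfl hT]
  have hcN : c + 1 ≤ N := hc
  rw [← Finset.sum_range_add_sum_Ico _ hcN, Finset.sum_range_succ]
  have h2 : ∑ i ∈ Finset.Ico (c+1) N,
      (if i < c then pvW (g c) (g i) ((c:Int) - (i:Int))
       else if i = c then ∑ j ∈ Finset.Ico (c+1) N, pvW (g c) (g j) ((j:Int) - (c:Int)) else 0) = 0 := by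
    refine Finset.sum_eq_zero (fun i hi => ?_)
    rw [Finset.mem_Ico] at hi
    rw [if_neg (by omega), if_neg (by omega)]
  rw [h2, add_zero, if_neg (lt_irrefl c), if_pos rfl]
  have h3 : ∀ i ∈ Finset.range c,
      (if i < c then pvW (g c) (g i) ((c:Int) - (i:Int))
       else if i = c then ∑ j ∈ Finset.Ico (c+1) N, pvW (g c) (g j) ((j:Int) - (c:Int)) else 0)
      = pvW (g c) (g i) ((c:Int) - (i:Int)) := by
    intro i hi; rw [Finset.mem_range] at hi; rw [if_pos hi]
  rw [Finset.sum_congr rfl h3]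
  -- RHS: pvCB
  unfold pvCB
  rw [← hN, ← Finset.sum_range_add_sum_Ico _ hcN, Finset.sum_range_succ, if_pos rfl, add_zero]
  congr 1
  · refine Finset.sum_congr rfl (fun j hj => ?_)
    rw [Finset.mem_range] at hj
    rw [if_neg (by omega)]
    have : |(j:Int) - (c:Int)| = (c:Int) - (j:Int) := by
      rw [abs_of_nonpos (by omega)]; ring
    rw [this]
  · refine Finset.sum_congr rfl (fun j hj => ?_)
    rw [Finset.mem_Ico] at hj
    rw [if_neg (by omega)]
    have : |(j:Int) - (c:Int)| = (j:Int) - (c:Int) := by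
      rw [abs_of_nonneg (by omega)]
    rw [this]

theorem pv_getD_set_ne (b : List Int) (c : Nat) (r : Int) (j : Nat) (hj : j ≠ c) :
    (b.set c r).getD j 0 = b.getD j 0 := by
  simp [List.getD_eq_getElem?_getD, List.getElem?_set_ne (Ne.symm hj)]

theorem pv_getD_set_self (b : List Int) (c : Nat) (r : Int) (hc : c < b.length) :
    (b.set c r).getD c 0 = r := by
  simp [List.getD_eq_getElem?_getD, hc]

theorem pvNC_set (b : List Int) (c : Nat) (r : Int) :
    pvNC (b.set c r) c = pvNC b c := by
  unfold pvNC
  rw [List.length_set]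
  refine Finset.sum_congr rfl (fun i _ => Finset.sum_congr rfl (fun j _ => ?_))
  split
  · rfl
  · rename_i h
    rw [not_or] at h
    rw [pv_getD_set_ne b c r i h.1, pv_getD_set_ne b c r j h.2]

theorem pvCB_set (b : List Int) (c : Nat) (r : Int) (v : Int) :
    pvCB (b.set c r) c v = pvCB b c v := by
  unfold pvCB
  rw [List.length_set]
  refine Finset.sum_congr rfl (fun j _ => ?_)
  split
  · rfl
  · rename_i h
    rw [pv_getD_set_ne b c r j h]

theorem pv_delta (b : List Int) (c : Nat) (hc : c < b.length) (r : Int) :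
    count_attacks (b.set c r) = count_attacks b + (pvCB b c r - pvCB b c (b.getD c 0)) := by
  have h1 : count_attacks (b.set c r) = pvNC b c + pvCB b c r := by
    rw [pvCA_eq, pv_decomp (b.set c r) c (by rwa [List.length_set]),
      pvNC_set, pvCB_set, pv_getD_set_self b c r hc]
  have h2 : count_attacks b = pvNC b c + pvCB b c (b.getD c 0) := by
    rw [pvCA_eq, pv_decomp b c hc]
  rw [h1, h2]; ring

theorem pv_foldl_flatMap {α β σ : Type} (l : List α) (g : α → List β) (f : σ → β → σ) (init : σ) :
    (l.flatMap g).foldl f init = l.foldl (fun s x => (g x).foldl f s) init := by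
  induction l generalizing init with
  | nil => rfl
  | cons x t ih => simp [List.flatMap_cons, List.foldl_append, ih]

def pvStepA (acc : Option (List Int)) (x : List Int) : Option (List Int) :=
  match acc with
  | none => some x
  | some m => if count_attacks x < count_attacks m then some x else some m

def pvRel (b : List Int) (oa : Option (List Int)) (ob : Option (Int × Int × Int)) : Prop :=
  match oa, ob with
  | none, none => True
  | some m, some p => m = PySem.List.pySetD b p.2.1 p.2.2
      ∧ count_attacks m = count_attacks b + p.1
  | _, _ => False

theorem pv_cand (b : List Int) (col : Int) (h0 : 0 ≤ col) (h1 : col < (b.length : Int)) (row : Int) :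
    count_attacks (PySem.List.pySetD b col row)
      = count_attacks b
        + (gbs_contrib b col row - gbs_contrib b col (PySem.List.pyGetD b col 0)) := by
  have hcast : col = ((col.toNat : Nat) : Int) := (Int.toNat_of_nonneg h0).symm
  have hlt : col.toNat < b.length := by omega
  rw [PySem.List.pySetD_of_nonneg _ _ h0]
  rw [hcast, pvCB_eq, pvCB_eq, PySem.List.pyGetD_natCast]
  exact pv_delta b col.toNat hlt row

theorem pv_rows (b : List Int) (col : Int) (h0 : 0 ≤ col) (h1 : col < (b.length : Int))
    (rows : List Int) (accA : Option (List Int)) (accB : Option (Int × Int × Int))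
    (hrel : pvRel b accA accB) :
    pvRel b
      (rows.foldl (fun acc row =>
        if PySem.List.pyGetD b col 0 ≠ row then pvStepA acc (PySem.List.pySetD b col row) else acc) accA)
      (rows.foldl (fun acc row =>
        if row ≠ PySem.List.pyGetD b col 0 then
          match acc with
          | none => some (gbs_contrib b col row - gbs_contrib b col (PySem.List.pyGetD b col 0), col, row)
          | some p => if gbs_contrib b col row - gbs_contrib b col (PySem.List.pyGetD b col 0) < p.1
              then some (gbs_contrib b col row - gbs_contrib b col (PySem.List.pyGetD b col 0), col, row)
              else some p
        else acc) accB) := by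
  induction rows generalizing accA accB with
  | nil => exact hrel
  | cons row t ih =>
      simp only [List.foldl_cons]
      apply ih
      by_cases hcond : PySem.List.pyGetD b col 0 = row
      · rw [if_neg (by simp [hcond]), if_neg (by simp [hcond])]
        exact hrel
      · rw [if_pos hcond, if_pos (Ne.symm hcond)]
        have hx := pv_cand b col h0 h1 row
        match accA, accB, hrel with
        | none, none, _ =>
            exact ⟨rfl, hx⟩
        | some m, some p, ⟨hm, hcnt⟩ =>
            simp only [pvStepA]
            by_cases hlt : count_attacks (PySem.List.pySetD b col row) < count_attacks m
            · rw [if_pos hlt, if_pos (by omega)]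
              exact ⟨rfl, hx⟩
            · rw [if_neg hlt, if_neg (by omega)]
              exact ⟨hm, hcnt⟩

theorem pv_cols (b : List Int) (cols : List Int)
    (hcols : ∀ col ∈ cols, 0 ≤ col ∧ col < (b.length : Int))
    (accA : Option (List Int)) (accB : Option (Int × Int × Int))
    (hrel : pvRel b accA accB) :
    pvRel b
      (cols.foldl (fun acc col =>
        (PySem.List.pyRange 0 (b.length : Int) 1).foldl (fun acc row =>
          if PySem.List.pyGetD b col 0 ≠ row then pvStepA acc (PySem.List.pySetD b col row) else acc) acc) accA)
      (cols.foldl (fun acc col =>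
        (PySem.List.pyRange 0 (b.length : Int) 1).foldl (fun acc row =>
          if row ≠ PySem.List.pyGetD b col 0 then
            match acc with
            | none => some (gbs_contrib b col row - gbs_contrib b col (PySem.List.pyGetD b col 0), col, row)
            | some p => if gbs_contrib b col row - gbs_contrib b col (PySem.List.pyGetD b col 0) < p.1
                then some (gbs_contrib b col row - gbs_contrib b col (PySem.List.pyGetD b col 0), col, row)
                else some p
          else acc) acc) accB) := by
  induction cols generalizing accA accB with
  | nil => exact hrel
  | cons col t ih =>
      simp only [List.foldl_cons]
      refine ih (fun x hx => hcols x (List.mem_cons_of_mem _ hx)) _ _ ?_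
      have h := hcols col (List.mem_cons_self)
      exact pv_rows b col h.1 h.2 _ accA accB hrel

theorem pv_foldl_acc_append {α β : Type} (l : List α) (F : List β → α → List β)
    (g : α → List β) (h : ∀ acc x, F acc x = acc ++ g x) (init : List β) :
    l.foldl F init = init ++ l.flatMap g := by
  induction l generalizing init with
  | nil => simp
  | cons x t ih => simp [h, ih, List.flatMap_cons, List.append_assoc]

theorem pv_foldl_congr {α σ : Type} (l : List α) (f g : σ → α → σ) (init : σ)
    (h : ∀ acc x, f acc x = g acc x) : l.foldl f init = l.foldl g init := by
  induction l generalizing init with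
  | nil => rfl
  | cons x t ih => simp only [List.foldl_cons, h, ih]

theorem pv_min?_eq (l : List (List Int)) :
    PySem.List.min? l count_attacks = l.foldl pvStepA none := by
  unfold PySem.List.min?
  exact pv_foldl_congr _ _ _ _ (fun acc x => by cases acc <;> rfl)

theorem pv_main (b : List Int) : get_best_successor b = get_best_successor_alt b := by
  show (PySem.List.min?
      ((PySem.List.pyRange 0 (b.length : Int) 1).foldl (fun succ col =>
        (PySem.List.pyRange 0 (b.length : Int) 1).foldl (fun succ row =>
          if PySem.List.pyGetD b col 0 ≠ row then
            succ ++ [PySem.List.pySetD b col row]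
          else succ) succ) []) count_attacks).getD []
    = match (PySem.List.pyRange 0 (b.length : Int) 1).foldl (fun best col =>
        (PySem.List.pyRange 0 (b.length : Int) 1).foldl (fun best row =>
          if row ≠ PySem.List.pyGetD b col 0 then
            match best with
            | none => some (gbs_contrib b col row - gbs_contrib b col (PySem.List.pyGetD b col 0), col, row)
            | some p => if gbs_contrib b col row - gbs_contrib b col (PySem.List.pyGetD b col 0) < p.1
                then some (gbs_contrib b col row - gbs_contrib b col (PySem.List.pyGetD b col 0), col, row)
                else some p
          else best) best) none with
      | some (_, col, row) => PySem.List.pySetD b col row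
      | none => []
  have hstep : ∀ (succ : List (List Int)) (col : Int),
      (PySem.List.pyRange 0 (b.length : Int) 1).foldl (fun succ row =>
        if PySem.List.pyGetD b col 0 ≠ row then
          succ ++ [PySem.List.pySetD b col row]
        else succ) succ
      = succ ++ ((PySem.List.pyRange 0 (b.length : Int) 1).filter
          (fun row => decide (PySem.List.pyGetD b col 0 ≠ row))).map
          (fun row => PySem.List.pySetD b col row) := by
    intro succ col
    exact PySem.List.foldl_append_ite _ _ _ _
  rw [pv_foldl_acc_append _ _ _ hstep, List.nil_append, pv_min?_eq, pv_foldl_flatMap]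
  have hinner : ∀ (acc : Option (List Int)) (col : Int),
      (((PySem.List.pyRange 0 (b.length : Int) 1).filter
        (fun row => decide (PySem.List.pyGetD b col 0 ≠ row))).map
        (fun row => PySem.List.pySetD b col row)).foldl pvStepA acc
      = (PySem.List.pyRange 0 (b.length : Int) 1).foldl (fun acc row =>
          if PySem.List.pyGetD b col 0 ≠ row then pvStepA acc (PySem.List.pySetD b col row) else acc) acc := by
    intro acc col
    rw [List.foldl_map, ← PySem.List.foldl_ite_eq_foldl_filter]
  rw [pv_foldl_congr _ _ _ _ hinner]
  have hrel := pv_cols b (PySem.List.pyRange 0 (b.length : Int) 1)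
    (by intro col hcol; rw [PySem.List.mem_pyRange_one] at hcol; exact hcol) none none trivial
  revert hrel
  generalize (PySem.List.pyRange 0 (b.length : Int) 1).foldl (fun acc col =>
      (PySem.List.pyRange 0 (b.length : Int) 1).foldl (fun acc row =>
        if PySem.List.pyGetD b col 0 ≠ row then pvStepA acc (PySem.List.pySetD b col row) else acc) acc) none = oa
  generalize (PySem.List.pyRange 0 (b.length : Int) 1).foldl (fun acc col =>
      (PySem.List.pyRange 0 (b.length : Int) 1).foldl (fun acc row =>
        if row ≠ PySem.List.pyGetD b col 0 then
          match acc with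
          | none => some (gbs_contrib b col row - gbs_contrib b col (PySem.List.pyGetD b col 0), col, row)
          | some p => if gbs_contrib b col row - gbs_contrib b col (PySem.List.pyGetD b col 0) < p.1
              then some (gbs_contrib b col row - gbs_contrib b col (PySem.List.pyGetD b col 0), col, row)
              else some p
        else acc) acc) none = ob
  intro hrel
  match oa, ob, hrel with
  | none, none, _ => rfl
  | some m, some p, ⟨hm, _⟩ => simpa using hm

-- ===== VERDICT (by name: the statement is the Claim_ definition above) =====
theorem get_best_successor_spec : Claim_equal_get_best_successor := by
  intro board _ _
  unfold Spec_get_best_successor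
  exact pv_main board
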